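-- pv_equiv track=rewrite | github.com/cscheid/advent-of-code-2018 | 4/main.py | process_intervals
-- ===== SOURCE A (Python) =====
-- def process_intervals(lst):
--     lst.sort()
--     lst_2 = (list((v[0], 'start', v) for v in lst) +
--              list((v[1], 'end', v) for v in lst[::-1]))
--     lst_2.sort(key=lambda l: l[0])
--
--     argmax_minute = None
--     max_minute = -100
--     current_count = 0
--     current_minute = -1
--     for event in lst_2:
--         current_minute = event[0]
--         if event[1] == 'start':
--             current_count += 1
--         elif event[1] == 'end':
--             current_count -= 1
--         if current_count > max_minute:
--             argmax_minute = current_minute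
--             max_minute = current_count
--     return argmax_minute, max_minute
-- ===== SOURCE B (Python) =====
-- def process_intervals(lst):
--     # Count start/end events per minute once, then sweep the distinct
--     # minutes in increasing order (instead of sorting and scanning the
--     # full 2n-event list).  Keeps A's in-place sort of the argument.
--     lst.sort()
--     starts = {}
--     ends = {}
--     for s, e in lst:
--         starts[s] = starts.get(s, 0) + 1
--         ends[e] = ends.get(e, 0) + 1
--     argmax_minute = None
--     max_minute = -100
--     count = 0
--     for m in sorted(set(starts) | set(ends)):
--         k = starts.get(m, 0)
--         # the running coverage peaks right after the start events of
--         # minute m; a minute with only end events peaks after its first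
--         # decrement
--         top = count + k if k else count - 1
--         if top > max_minute:
--             argmax_minute = m
--             max_minute = top
--         count += k - ends.get(m, 0)
--     return argmax_minute, max_minute
-- ===== Notes on version B (the rewrite author's own statement) =====
-- stated objective: alternative
-- what changed: B replaces A's construction and key-sort of the 2n-element start/end event list and its event-by-event sweep with two per-minute counting dicts built in one pass and a single sweep over the sorted distinct minutes; Pre_ excludes only the empty list, on which A returns (None, -100) and None is not a value of the declared int result type.
-- outside the precondition, e.g. on process_intervals([]): A returns (None, -100), B returns (None, -100)
import Mathlib
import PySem

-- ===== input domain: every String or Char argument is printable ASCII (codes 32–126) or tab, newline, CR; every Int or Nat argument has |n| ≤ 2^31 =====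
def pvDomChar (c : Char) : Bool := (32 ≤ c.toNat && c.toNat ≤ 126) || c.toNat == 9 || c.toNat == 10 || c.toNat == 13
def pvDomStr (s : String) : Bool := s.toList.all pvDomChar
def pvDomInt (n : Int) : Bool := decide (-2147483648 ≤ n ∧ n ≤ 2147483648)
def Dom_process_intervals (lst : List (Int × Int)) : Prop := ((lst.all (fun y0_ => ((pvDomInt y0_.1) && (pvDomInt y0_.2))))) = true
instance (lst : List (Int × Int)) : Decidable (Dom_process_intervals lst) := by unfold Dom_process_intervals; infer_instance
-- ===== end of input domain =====

-- B replaces A's sort-and-sweep over the 2n-event list by per-minute start/end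
-- counters and one pass over the sorted distinct minutes (objective: alternative).
-- Both Pythons sort the argument list in place (the same mutation); the equivalence
-- proved here is about the return value.

-- ===== PORT A =====
-- loop body of A's 'for event in lst_2' (state: argmax_minute, max_minute, current_count, current_minute)
def pvAStep (st : Option Int × Int × Int × Int) (event : Int × String × (Int × Int)) :
    Option Int × Int × Int × Int :=
  let current_minute := event.1
  let current_count :=
    if event.2.1 == "start" then st.2.2.1 + 1
    else if event.2.1 == "end" then st.2.2.1 - 1
    else st.2.2.1
  if current_count > st.2.1 then (some current_minute, current_count, current_count, current_minute)
  else (st.1, st.2.1, current_count, current_minute)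

def process_intervals (lst : List (Int × Int)) : Int × Int :=
  let lstS := PySem.List.sorted2 lst (fun v => v.1) (fun v => v.2)   -- lst.sort()
  let lst2 := lstS.map (fun v => (v.1, ("start", v)))
              ++ ((PySem.List.slice? lstS none none (-1)).getD []).map (fun v => (v.2, ("end", v)))
              -- lst[::-1]; slice? is none only for step 0
  let lst2s := PySem.List.sorted lst2 (fun l => l.1)                 -- lst_2.sort(key=lambda l: l[0])
  let st := lst2s.foldl pvAStep (none, -100, 0, -1)
  (st.1.getD 0, st.2.1)   -- argmax_minute is None only for lst = [], which Pre_ excludes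

-- ===== PORT B =====
-- loop body of B's counting pass: starts[s] += 1, ends[e] += 1
def pvBCount (d : PySem.Dict Int Int × PySem.Dict Int Int) (p : Int × Int) :
    PySem.Dict Int Int × PySem.Dict Int Int :=
  (d.1.insert p.1 (d.1.getD p.1 0 + 1), d.2.insert p.2 (d.2.getD p.2 0 + 1))

-- loop body of B's sweep over the sorted distinct minutes
def pvBStep (starts ends : PySem.Dict Int Int) (st : Option Int × Int × Int) (m : Int) :
    Option Int × Int × Int :=
  let k := starts.getD m 0
  let top := if k ≠ 0 then st.2.2 + k else st.2.2 - 1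
  let newc := st.2.2 + k - ends.getD m 0
  if top > st.2.1 then (some m, top, newc) else (st.1, st.2.1, newc)

def process_intervals_alt (lst : List (Int × Int)) : Int × Int :=
  let lstS := PySem.List.sorted2 lst (fun v => v.1) (fun v => v.2)   -- lst.sort()
  let dicts := lstS.foldl pvBCount (PySem.Dict.empty, PySem.Dict.empty)
  let starts := dicts.1
  let ends := dicts.2
  let minutes := PySem.List.sorted (PySem.Set.union (PySem.Set.ofList starts.keys) ends.keys)
    (fun m => m)                                                      -- sorted(set(starts) | set(ends))
  let st := minutes.foldl (pvBStep starts ends) (none, -100, 0)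
  (st.1.getD 0, st.2.1)   -- argmax_minute is None only for lst = [], which Pre_ excludes

-- ===== PRECONDITION & SPEC =====
-- Pre_ excludes only the empty list: there the Python A returns (None, -100), and
-- None is not a value of the declared Int result type.
def Pre_process_intervals (lst : List (Int × Int)) : Prop := lst ≠ []
instance (lst : List (Int × Int)) : Decidable (Pre_process_intervals lst) := by
  unfold Pre_process_intervals; infer_instance

def pvWitness_process_intervals : (List (Int × Int)) := ([(0, 1)])

def Spec_process_intervals (lst : List (Int × Int)) (out : Int × Int) : Prop := out = process_intervals_alt lst
instance (lst : List (Int × Int)) (out : Int × Int) : Decidable (Spec_process_intervals lst out) := by unfold Spec_process_intervals; infer_instance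

-- ===== CLAIM (what is proved, stated in full; the proofs are below) =====
def Claim_equal_process_intervals : Prop := ∀ (lst : List (Int × Int)), Dom_process_intervals lst → Pre_process_intervals lst → Spec_process_intervals lst (process_intervals lst)

-- ===== LEMMAS AND PROOFS =====

-- A's state after dropping the write-only current_minute component
def pvPi (st : Option Int × Int × Int × Int) : Option Int × Int × Int := (st.1, st.2.1, st.2.2.1)

-- A's loop body on the 3-component state
def pvAStep3 (st : Option Int × Int × Int) (ev : Int × String × (Int × Int)) :
    Option Int × Int × Int :=
  let cc :=
    if ev.2.1 == "start" then st.2.2 + 1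
    else if ev.2.1 == "end" then st.2.2 - 1
    else st.2.2
  if cc > st.2.1 then (some ev.1, cc, cc) else (st.1, st.2.1, cc)

-- one start / one end event at minute m, on the 3-component state
def pvStepS (m : Int) (st : Option Int × Int × Int) : Option Int × Int × Int :=
  if st.2.2 + 1 > st.2.1 then (some m, st.2.2 + 1, st.2.2 + 1) else (st.1, st.2.1, st.2.2 + 1)
def pvStepE (m : Int) (st : Option Int × Int × Int) : Option Int × Int × Int :=
  if st.2.2 - 1 > st.2.1 then (some m, st.2.2 - 1, st.2.2 - 1) else (st.1, st.2.1, st.2.2 - 1)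

-- ordered insert of a key into a strictly increasing key list (no-op if present)
def pvInsKey : List Int → Int → List Int
  | [], k => [k]
  | m :: t, k => if k < m then k :: m :: t else if k = m then m :: t else m :: pvInsKey t k

-- A's whole sweep restricted to the events of one minute m
def pvGroup (L : List (Int × Int)) (st : Option Int × Int × Int) (m : Int) :
    Option Int × Int × Int :=
  (L.reverse.filter (fun v => v.2 == m)).foldl (fun s _ => pvStepE m s)
    ((L.filter (fun v => v.1 == m)).foldl (fun s _ => pvStepS m s) st)

theorem pvPi_foldl (E : List (Int × String × (Int × Int))) :
    ∀ st, pvPi (E.foldl pvAStep st) = E.foldl pvAStep3 (pvPi st) := by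
  induction E with
  | nil => intro st; rfl
  | cons e t ih =>
    intro st
    simp only [List.foldl_cons]
    rw [ih]
    congr 1
    obtain ⟨am, b, c, cur⟩ := st
    simp only [pvAStep, pvAStep3, pvPi]
    split_ifs <;> rfl

theorem pv_insertBy_front {α : Type} (bef : α → α → Bool) (x : α) (l : List α)
    (h : ∀ y ∈ l, bef x y = true) : PySem.List.insertBy bef x l = x :: l := by
  cases l with
  | nil => rfl
  | cons y ys => simp [PySem.List.insertBy, h y (by simp)]

theorem pv_insertBy_append {α : Type} (bef : α → α → Bool) (x : α) (l₁ l₂ : List α)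
    (h : ∀ y ∈ l₁, bef x y = false) :
    PySem.List.insertBy bef x (l₁ ++ l₂) = l₁ ++ PySem.List.insertBy bef x l₂ := by
  induction l₁ with
  | nil => rfl
  | cons y ys ih =>
    simp only [List.cons_append, PySem.List.insertBy, h y (by simp)]
    simp [ih (fun z hz => h z (by simp [hz]))]

theorem pv_mem_insKey {l : List Int} {k y : Int} (h : y ∈ pvInsKey l k) : y = k ∨ y ∈ l := by
  induction l with
  | nil => simpa [pvInsKey] using h
  | cons m t ih =>
    by_cases h1 : k < m
    · simp_all [pvInsKey]
    · by_cases h2 : k = m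
      · simp_all [pvInsKey]
      · simp only [pvInsKey, if_neg h1, if_neg h2, List.mem_cons] at h
        rcases h with h | h
        · simp [h]
        · rcases ih h with h | h <;> simp [h]

theorem pv_insKey_pairwise {l : List Int} (h : l.Pairwise (· < ·)) (k : Int) :
    (pvInsKey l k).Pairwise (· < ·) := by
  induction l with
  | nil => simp [pvInsKey]
  | cons m t ih =>
    rcases List.pairwise_cons.mp h with ⟨hm, ht⟩
    by_cases h1 : k < m
    · simp only [pvInsKey, if_pos h1]
      exact List.pairwise_cons.mpr ⟨by
        intro y hy
        rcases List.mem_cons.mp hy with rfl | hy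
        · exact h1
        · exact h1.trans (hm y hy), h⟩
    · by_cases h2 : k = m
      · simpa [pvInsKey, if_neg h1, if_pos h2] using h
      · simp only [pvInsKey, if_neg h1, if_neg h2]
        refine List.pairwise_cons.mpr ⟨?_, ih ht⟩
        intro y hy
        rcases pv_mem_insKey hy with rfl | hy
        · omega
        · exact hm y hy

theorem pv_insKey_of_mem {l : List Int} (h : l.Pairwise (· < ·)) {k : Int} (hk : k ∈ l) :
    pvInsKey l k = l := by
  induction l with
  | nil => simp at hk
  | cons m t ih =>
    rcases List.pairwise_cons.mp h with ⟨hm, ht⟩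
    rcases List.mem_cons.mp hk with rfl | hk
    · simp [pvInsKey]
    · have h1 : ¬ k < m := by have := hm k hk; omega
      have hkm : k ≠ m := by have := hm k hk; omega
      simp [pvInsKey, h1, hkm, ih ht hk]

theorem pv_insKey_perm {l : List Int} {k : Int} (hk : k ∉ l) :
    (pvInsKey l k).Perm (l ++ [k]) := by
  induction l with
  | nil => simp [pvInsKey]
  | cons m t ih =>
    simp only [List.mem_cons, not_or] at hk
    by_cases h1 : k < m
    · simp only [pvInsKey, if_pos h1]
      exact (List.perm_append_singleton k (m :: t)).symm
    · simp only [pvInsKey, if_neg h1, if_neg hk.1, List.cons_append]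
      exact (ih hk.2).cons m

theorem pv_K_snoc (A : List Int) (k : Int) :
    PySem.List.sorted (PySem.Set.ofList (A ++ [k])) (fun x => x)
      = pvInsKey (PySem.List.sorted (PySem.Set.ofList A) (fun x => x)) k := by
  have hof : PySem.Set.ofList (A ++ [k]) = PySem.Set.add (PySem.Set.ofList A) k := by
    simp [PySem.Set.ofList, List.foldl_append]
  have hpw := PySem.List.sorted_ofList_pairwise_lt (κ := Int) A
  by_cases hk : k ∈ PySem.Set.ofList A
  · have hadd : PySem.Set.add (PySem.Set.ofList A) k = PySem.Set.ofList A := by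
      simp only [PySem.Set.add, if_pos ((PySem.Set.contains_iff _ _).mpr hk)]
    rw [hof, hadd, pv_insKey_of_mem hpw ((PySem.List.mem_sorted _ _ _ _).mpr hk)]
  · have hadd : PySem.Set.add (PySem.Set.ofList A) k = PySem.Set.ofList A ++ [k] := by
      simp only [PySem.Set.add, ite_eq_right_iff]
      intro hc
      exact absurd ((PySem.Set.contains_iff _ _).mp hc) hk
    rw [hof, hadd]
    have hknot : k ∉ PySem.List.sorted (PySem.Set.ofList A) (fun x => x) := by
      rw [PySem.List.mem_sorted]; exact hk
    refine PySem.List.sorted_eq_of_perm_of_pairwise_lt _ _ _ ?_ ?_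
    · exact (pv_insKey_perm hknot).trans
        (List.Perm.append_right [k] (PySem.List.sorted_perm _ _ _))
    · exact pv_insKey_pairwise hpw k

theorem pv_ins_grouped {α : Type} (key : α → Int) (x : α) :
    ∀ (ks : List Int) (g : Int → List α), ks.Pairwise (· < ·) →
    (∀ m, ∀ e ∈ g m, key e = m) → (key x ∈ ks ∨ g (key x) = []) →
    PySem.List.insertBy (fun a b => decide (key a < key b)) x (ks.flatMap g)
      = (pvInsKey ks (key x)).flatMap (fun m => g m ++ if key x == m then [x] else []) := by
  intro ks
  induction ks with
  | nil =>
    intro g _ _ hx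
    rcases hx with hx | hx
    · simp at hx
    · simp [pvInsKey, PySem.List.insertBy, hx]
  | cons m t ih =>
    intro g hpw hg hx
    rcases List.pairwise_cons.mp hpw with ⟨hm, ht⟩
    simp only [List.flatMap_cons]
    by_cases h1 : key x < m
    · have hgx : g (key x) = [] := by
        rcases hx with hx | hx
        · rcases List.mem_cons.mp hx with rfl | hx
          · omega
          · exact absurd h1 (by have := hm _ hx; omega)
        · exact hx
      have hfront : ∀ y ∈ g m ++ t.flatMap g,
          (fun a b => decide (key a < key b)) x y = true := by
        intro y hy
        rcases List.mem_append.mp hy with hy | hy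
        · have := hg m y hy; simp only [decide_eq_true_eq]; omega
        · rcases List.mem_flatMap.mp hy with ⟨m', hm', hy'⟩
          have := hg m' y hy'
          have := hm m' hm'
          simp only [decide_eq_true_eq]; omega
      rw [pv_insertBy_front _ _ _ hfront]
      have e3 : t.flatMap (fun m' => g m' ++ if key x = m' then [x] else []) = t.flatMap g := by
        refine List.flatMap_congr (fun m' hm' => ?_)
        have hlt := hm m' hm'
        simp [(h1.trans hlt).ne]
      simp only [pvInsKey, if_pos h1]
      simp [hgx, h1.ne]
      exact e3.symm
    · have hpass : ∀ y ∈ g m, (fun a b => decide (key a < key b)) x y = false := by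
        intro y hy
        have := hg m y hy
        simp only [decide_eq_false_iff_not]; omega
      rw [pv_insertBy_append _ _ _ _ hpass]
      by_cases h2 : key x = m
      · have hfront : ∀ y ∈ t.flatMap g,
            (fun a b => decide (key a < key b)) x y = true := by
          intro y hy
          rcases List.mem_flatMap.mp hy with ⟨m', hm', hy'⟩
          have := hg m' y hy'
          have := hm m' hm'
          simp only [decide_eq_true_eq]; omega
        rw [pv_insertBy_front _ _ _ hfront]
        have e3 : t.flatMap (fun m' => g m' ++ if key x = m' then [x] else []) = t.flatMap g := by
          refine List.flatMap_congr (fun m' hm' => ?_)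
          have hlt := hm m' hm'
          simp [show ¬ key x = m' from by rw [h2]; exact hlt.ne]
        simp [pvInsKey, h2]
        rw [← h2]
        exact e3.symm
      · have hx' : key x ∈ t ∨ g (key x) = [] := by
          rcases hx with hx | hx
          · rcases List.mem_cons.mp hx with rfl | hx
            · omega
            · exact Or.inl hx
          · exact Or.inr hx
        rw [ih g ht hg hx']
        simp [pvInsKey, if_neg h1, h2]

theorem pv_sorted_grouped {α : Type} (key : α → Int) (xs : List α) :
    PySem.List.sorted xs key
      = (PySem.List.sorted (PySem.Set.ofList (xs.map key)) (fun x => x)).flatMap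
          (fun m => xs.filter (fun e => key e == m)) := by
  induction xs using List.reverseRecOn with
  | nil => rfl
  | append_singleton xs x ih =>
    have hpw := PySem.List.sorted_ofList_pairwise_lt (κ := Int) (xs.map key)
    have hg : ∀ m, ∀ e ∈ xs.filter (fun e => key e == m), key e = m := by
      intro m e he
      simpa using (List.mem_filter.mp he).2
    have hx : key x ∈ PySem.List.sorted (PySem.Set.ofList (xs.map key)) (fun x => x) ∨
        xs.filter (fun e => key e == key x) = [] := by
      by_cases hmem : key x ∈ xs.map key
      · exact Or.inl ((PySem.List.mem_sorted _ _ _ _).mpr ((PySem.Set.mem_ofList _ _).mpr hmem))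
      · refine Or.inr (List.filter_eq_nil_iff.mpr ?_)
        intro e he
        simp only [beq_iff_eq]
        intro hq
        exact hmem (hq ▸ List.mem_map_of_mem he)
    rw [PySem.List.sorted_eq_foldl_insertBy, List.foldl_append, List.foldl_cons, List.foldl_nil,
      ← PySem.List.sorted_eq_foldl_insertBy, ih,
      pv_ins_grouped key x _ _ hpw hg hx,
      List.map_append, List.map_cons, List.map_nil, pv_K_snoc]
    refine List.flatMap_congr (fun m hm => ?_)
    rw [List.filter_append]
    congr 1
    simp [List.filter_singleton]

theorem pv_auxS {β : Type} (m : Int) (P : List β) :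
    ∀ (st : Option Int × Int × Int), st.2.2 ≤ st.2.1 →
    P.foldl (fun s _ => pvStepS m s) st
      = (if st.2.1 < st.2.2 + P.length then some m else st.1,
         max st.2.1 (st.2.2 + P.length), st.2.2 + P.length) := by
  induction P with
  | nil =>
    intro st h
    simp only [List.foldl_nil, List.length_nil, Nat.cast_zero, add_zero]
    rw [if_neg (by omega), max_eq_left h]
  | cons p t ih =>
    intro st h
    obtain ⟨am, best, c⟩ := st
    simp only at h
    simp only [List.foldl_cons, List.length_cons, Nat.cast_add, Nat.cast_one]
    by_cases hb : c + 1 > best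
    · rw [show pvStepS m (am, best, c) = (some m, c + 1, c + 1) by simp [pvStepS, hb]]
      rw [ih (some m, c + 1, c + 1) (by dsimp only; omega)]
      rw [ite_self, if_pos (by omega)]
      simp only [Prod.mk.injEq]
      refine ⟨?_, ?_, ?_⟩ <;> first | trivial | omega
    · rw [show pvStepS m (am, best, c) = (am, best, c + 1) by simp [pvStepS]; omega]
      rw [ih (am, best, c + 1) (by dsimp only; omega)]
      simp only [Prod.mk.injEq]
      refine ⟨?_, by omega, by omega⟩
      by_cases h2 : best < c + 1 + (t.length : Int)
      · rw [if_pos (by omega), if_pos (by omega)]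
      · rw [if_neg (by omega), if_neg (by omega)]

theorem pv_auxE {β : Type} (m : Int) (Q : List β) :
    ∀ (st : Option Int × Int × Int), st.2.2 ≤ st.2.1 →
    Q.foldl (fun s _ => pvStepE m s) st = (st.1, st.2.1, st.2.2 - Q.length) := by
  induction Q with
  | nil => intro st h; simp
  | cons q t ih =>
    intro st h
    obtain ⟨am, best, c⟩ := st
    simp only at h
    simp only [List.foldl_cons, List.length_cons, Nat.cast_add, Nat.cast_one]
    rw [show pvStepE m (am, best, c) = (am, best, c - 1) by simp [pvStepE]; omega]
    rw [ih (am, best, c - 1) (by dsimp only; omega)]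
    simp only [Prod.mk.injEq]
    refine ⟨?_, ?_, ?_⟩ <;> first | trivial | omega

theorem pv_group {β γ : Type} (m : Int) (P : List β) (Q : List γ)
    (hne : P ≠ [] ∨ Q ≠ []) (st : Option Int × Int × Int) :
    Q.foldl (fun s _ => pvStepE m s) (P.foldl (fun s _ => pvStepS m s) st)
      = (if (if (P.length : Int) ≠ 0 then st.2.2 + P.length else st.2.2 - 1) > st.2.1
         then (some m, (if (P.length : Int) ≠ 0 then st.2.2 + P.length else st.2.2 - 1),
               st.2.2 + P.length - Q.length)
         else (st.1, st.2.1, st.2.2 + P.length - Q.length)) := by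
  obtain ⟨am, best, c⟩ := st
  cases P with
  | cons p t =>
    simp only [List.foldl_cons, List.length_cons, Nat.cast_add, Nat.cast_one]
    rw [if_pos (show (t.length : Int) + 1 ≠ 0 by omega)]
    by_cases hb : c + 1 > best
    · rw [show pvStepS m (am, best, c) = (some m, c + 1, c + 1) by simp [pvStepS, hb]]
      rw [pv_auxS m t (some m, c + 1, c + 1) (by dsimp only; omega)]
      rw [pv_auxE m Q _ (by dsimp only; omega)]
      rw [if_pos (show c + ((t.length : Int) + 1) > best by omega)]
      rw [ite_self]
      simp only [Prod.mk.injEq]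
      refine ⟨?_, ?_, ?_⟩ <;> first | trivial | omega
    · rw [show pvStepS m (am, best, c) = (am, best, c + 1) by simp [pvStepS]; omega]
      rw [pv_auxS m t (am, best, c + 1) (by dsimp only; omega)]
      rw [pv_auxE m Q _ (by dsimp only; omega)]
      by_cases h2 : best < c + 1 + (t.length : Int)
      · rw [if_pos (show c + ((t.length : Int) + 1) > best by omega)]
        simp only [Prod.mk.injEq]
        refine ⟨by rw [if_pos (by omega)], ?_, ?_⟩ <;> omega
      · rw [if_neg (show ¬ c + ((t.length : Int) + 1) > best by omega)]
        simp only [Prod.mk.injEq]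
        refine ⟨by rw [if_neg (by omega)], ?_, ?_⟩ <;>
          first | trivial | omega
  | nil =>
    cases Q with
    | nil => simp at hne
    | cons q t =>
      simp only [List.foldl_nil, List.foldl_cons, List.length_nil, List.length_cons,
        Nat.cast_zero, Nat.cast_add, Nat.cast_one, add_zero]
      rw [if_neg (show ¬ ((0 : Int) ≠ 0) by omega)]
      by_cases hb : c - 1 > best
      · rw [show pvStepE m (am, best, c) = (some m, c - 1, c - 1) by simp [pvStepE, hb]]
        rw [pv_auxE m t _ (by dsimp only; omega)]
        rw [if_pos (show c - 1 > best by omega)]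
        simp only [Prod.mk.injEq]
        refine ⟨?_, ?_, ?_⟩ <;> first | trivial | omega
      · rw [show pvStepE m (am, best, c) = (am, best, c - 1) by simp [pvStepE]; omega]
        rw [pv_auxE m t _ (by dsimp only; omega)]
        rw [if_neg (show ¬ c - 1 > best by omega)]
        simp only [Prod.mk.injEq]
        refine ⟨?_, ?_, ?_⟩ <;> first | trivial | omega

theorem pv_foldl_flatMap {α β σ : Type} (l : List α) (g : α → List β) (f : σ → β → σ) :
    ∀ (s : σ), (l.flatMap g).foldl f s = l.foldl (fun s a => (g a).foldl f s) s := by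
  induction l with
  | nil => intro s; rfl
  | cons a t ih => intro s; simp [List.flatMap_cons, List.foldl_append, ih]

theorem pv_getD_countDict (L : List (Int × Int)) (f : Int × Int → Int) (m : Int) :
    (L.foldl (fun (d : PySem.Dict Int Int) p => d.insert (f p) (d.getD (f p) 0 + 1))
      PySem.Dict.empty).getD m 0 = ((L.map f).count m : Int) := by
  have e : (fun (d : PySem.Dict Int Int) p => d.insert (f p) (d.getD (f p) 0 + 1))
      = (fun d p => d.modify (f p) 0 (· + 1)) := rfl
  rw [e,
    show (L.foldl (fun (d : PySem.Dict Int Int) p => d.modify (f p) 0 (· + 1)) PySem.Dict.empty)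
      = ((L.map f).foldl (fun (d : PySem.Dict Int Int) x => d.modify x 0 (· + 1))
          PySem.Dict.empty) from
      (List.foldl_map (f := f) (g := fun (d : PySem.Dict Int Int) x => d.modify x 0 (· + 1))
        (l := L) (init := PySem.Dict.empty)).symm,
    PySem.Dict.getD_foldl_modify_add_one]
  simp

theorem pv_mem_keys_countDict (L : List (Int × Int)) (f : Int × Int → Int) (m : Int) :
    m ∈ (L.foldl (fun (d : PySem.Dict Int Int) p => d.insert (f p) (d.getD (f p) 0 + 1))
      PySem.Dict.empty).keys ↔ m ∈ L.map f := by
  have aux : ∀ (l : List (Int × Int)) (d : PySem.Dict Int Int),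
      m ∈ (l.foldl (fun (d : PySem.Dict Int Int) p => d.insert (f p) (d.getD (f p) 0 + 1))
        d).keys ↔ m ∈ l.map f ∨ m ∈ d.keys := by
    intro l
    induction l with
    | nil => intro d; simp
    | cons p t ih =>
      intro d
      simp only [List.foldl_cons, List.map_cons, List.mem_cons]
      rw [ih, PySem.Dict.mem_keys_insert]
      tauto
  rw [aux L PySem.Dict.empty]
  simp

theorem pv_mem_update : ∀ (xs : List Int) (s : PySem.Set Int) (m : Int),
    m ∈ PySem.Set.update s xs ↔ m ∈ s ∨ m ∈ xs := by
  intro xs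
  induction xs with
  | nil => intro s m; simp [PySem.Set.update]
  | cons x t ih =>
    intro s m
    rw [show PySem.Set.update s (x :: t) = PySem.Set.update (s.add x) t from rfl, ih,
      PySem.Set.mem_add]
    simp only [List.mem_cons]
    tauto

-- A's whole sweep equals a fold of pvGroup over the sorted distinct minutes
theorem pv_Aside (L : List (Int × Int)) :
    pvPi (((PySem.List.sorted
        (L.map (fun v => (v.1, ("start", v))) ++ L.reverse.map (fun v => (v.2, ("end", v))))
        (fun l => l.1))).foldl pvAStep (none, -100, 0, -1))
      = (PySem.List.sorted (PySem.Set.ofList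
            ((L.map (fun v => (v.1, ("start", v)))
              ++ L.reverse.map (fun v => (v.2, ("end", v)))).map (fun l => l.1)))
          (fun x => x)).foldl (pvGroup L) (none, -100, 0) := by
  rw [pvPi_foldl, pv_sorted_grouped, pv_foldl_flatMap]
  refine PySem.List.foldl_congr_mem _ _ _ _ ?_
  intro st m _
  rw [List.filter_append, List.foldl_append, List.filter_map, List.filter_map,
    List.foldl_map, List.foldl_map]
  have ecs : ((fun (e : Int × String × (Int × Int)) => e.1 == m) ∘
      (fun (v : Int × Int) => (v.1, ("start", v)))) = (fun (v : Int × Int) => v.1 == m) := rfl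
  have ece : ((fun (e : Int × String × (Int × Int)) => e.1 == m) ∘
      (fun (v : Int × Int) => (v.2, ("end", v)))) = (fun (v : Int × Int) => v.2 == m) := rfl
  rw [ecs, ece]
  unfold pvGroup
  rw [PySem.List.foldl_congr_mem (L.filter (fun v => v.1 == m)) _
    (fun s (_ : Int × Int) => pvStepS m s) st (by
      intro acc v hv
      have hvm : v.1 = m := by simpa using (List.mem_filter.mp hv).2
      simp [pvAStep3, pvStepS, hvm])]
  refine PySem.List.foldl_congr_mem (L.reverse.filter (fun v => v.2 == m)) _
    (fun s (_ : Int × Int) => pvStepE m s) _ ?_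
  intro acc v hv
  have hvm : v.2 = m := by simpa using (List.mem_filter.mp hv).2
  simp [pvAStep3, pvStepE, hvm]

-- B's sweep equals the same fold of pvGroup over the same minutes
theorem pv_Bside (L : List (Int × Int)) :
    (PySem.List.sorted
        (PySem.Set.union
          (PySem.Set.ofList (L.foldl pvBCount (PySem.Dict.empty, PySem.Dict.empty)).1.keys)
          (L.foldl pvBCount (PySem.Dict.empty, PySem.Dict.empty)).2.keys) (fun m => m)).foldl
      (pvBStep (L.foldl pvBCount (PySem.Dict.empty, PySem.Dict.empty)).1
        (L.foldl pvBCount (PySem.Dict.empty, PySem.Dict.empty)).2) (none, -100, 0)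
      = (PySem.List.sorted (PySem.Set.ofList
            ((L.map (fun v => (v.1, ("start", v)))
              ++ L.reverse.map (fun v => (v.2, ("end", v)))).map (fun l => l.1)))
          (fun x => x)).foldl (pvGroup L) (none, -100, 0) := by
  have hsplit : L.foldl pvBCount (PySem.Dict.empty, PySem.Dict.empty)
      = (L.foldl (fun (d : PySem.Dict Int Int) p => d.insert p.1 (d.getD p.1 0 + 1))
          PySem.Dict.empty,
         L.foldl (fun (d : PySem.Dict Int Int) p => d.insert p.2 (d.getD p.2 0 + 1))
          PySem.Dict.empty) := by
    unfold pvBCount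
    exact PySem.List.foldl_prod_mk
      (fun (d : PySem.Dict Int Int) p => d.insert p.1 (d.getD p.1 0 + 1))
      (fun (d : PySem.Dict Int Int) p => d.insert p.2 (d.getD p.2 0 + 1)) L _ _
  rw [hsplit]
  set DS := L.foldl (fun (d : PySem.Dict Int Int) p => d.insert p.1 (d.getD p.1 0 + 1))
    PySem.Dict.empty with hDSdef
  set DE := L.foldl (fun (d : PySem.Dict Int Int) p => d.insert p.2 (d.getD p.2 0 + 1))
    PySem.Dict.empty with hDEdef
  have hmemmap : ∀ m : Int,
      m ∈ ((L.map (fun v => (v.1, ("start", v)))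
        ++ L.reverse.map (fun v => (v.2, ("end", v)))).map
          (fun (l : Int × String × (Int × Int)) => l.1))
      ↔ m ∈ L.map (fun v => v.1) ∨ m ∈ L.map (fun v => v.2) := by
    intro m
    simp only [List.map_append, List.map_map, List.mem_append]
    constructor
    · rintro (h | h)
      · exact Or.inl (by simpa using h)
      · right
        rcases List.mem_map.mp h with ⟨v, hv, hvm⟩
        exact List.mem_map.mpr ⟨v, List.mem_reverse.mp hv, by simpa using hvm⟩
    · rintro (h | h)
      · exact Or.inl (by simpa using h)
      · right
        rcases List.mem_map.mp h with ⟨v, hv, hvm⟩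
        exact List.mem_map.mpr ⟨v, List.mem_reverse.mpr hv, by simpa using hvm⟩
  have hM : PySem.List.sorted (PySem.Set.union (PySem.Set.ofList DS.keys) DE.keys) (fun m => m)
      = PySem.List.sorted (PySem.Set.ofList
          ((L.map (fun v => (v.1, ("start", v)))
            ++ L.reverse.map (fun v => (v.2, ("end", v)))).map (fun l => l.1)))
        (fun x => x) := by
    refine PySem.List.sorted_eq_sorted_of_perm _ _ _ (fun a b h => h) ?_
    refine (List.perm_ext_iff_of_nodup
      (PySem.Set.nodup_union _ _ (PySem.Set.nodup_ofList _))
      (PySem.Set.nodup_ofList _)).mpr ?_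
    intro a
    rw [show PySem.Set.union (PySem.Set.ofList DS.keys) DE.keys
        = PySem.Set.update (PySem.Set.ofList DS.keys) DE.keys from rfl,
      pv_mem_update, PySem.Set.mem_ofList, PySem.Set.mem_ofList,
      hDSdef, hDEdef, pv_mem_keys_countDict, pv_mem_keys_countDict, hmemmap a]
  rw [hM]
  refine PySem.List.foldl_congr_mem _ _ _ _ ?_
  intro st m hm
  have hmm : m ∈ L.map (fun v => v.1) ∨ m ∈ L.map (fun v => v.2) := by
    rw [← hmemmap m, ← PySem.Set.mem_ofList, ← PySem.List.mem_sorted _ (fun x => x) false]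
    exact hm
  have ha : DS.getD m 0 = ((L.filter (fun v => v.1 == m)).length : Int) := by
    rw [hDSdef, pv_getD_countDict, List.count_eq_countP, List.countP_map,
      List.countP_eq_length_filter]
    exact rfl
  have hb : DE.getD m 0 = ((L.reverse.filter (fun v => v.2 == m)).length : Int) := by
    rw [hDEdef, pv_getD_countDict, List.count_eq_countP, List.countP_map,
      List.countP_eq_length_filter, List.filter_reverse, List.length_reverse]
    exact rfl
  have hne : L.filter (fun v => v.1 == m) ≠ [] ∨ L.reverse.filter (fun v => v.2 == m) ≠ [] := by
    rcases hmm with h | h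
    · left
      rcases List.mem_map.mp h with ⟨v, hv, hvm⟩
      exact List.ne_nil_of_mem (List.mem_filter.mpr ⟨hv, by simp [hvm]⟩)
    · right
      rcases List.mem_map.mp h with ⟨v, hv, hvm⟩
      exact List.ne_nil_of_mem
        (List.mem_filter.mpr ⟨List.mem_reverse.mpr hv, by simp [hvm]⟩)
  unfold pvGroup
  rw [pv_group m _ _ hne st]
  simp only [pvBStep, ha, hb]

-- ===== VERDICT (by name: the statement is the Claim_ definition above) =====
theorem process_intervals_spec : Claim_equal_process_intervals := by
  intro lst _hdom _hpre
  unfold Spec_process_intervals process_intervals process_intervals_alt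
  simp only [PySem.List.slice?_none_none_neg_one, Option.getD_some]
  set L := PySem.List.sorted2 lst (fun v => v.1) (fun v => v.2) with hL
  have hA := pv_Aside L
  have hB := pv_Bside L
  rw [← hB] at hA
  have h1 : (((PySem.List.sorted
      (L.map (fun v => (v.1, ("start", v))) ++ L.reverse.map (fun v => (v.2, ("end", v))))
      (fun l => l.1))).foldl pvAStep (none, -100, 0, -1)).1
      = (((PySem.List.sorted
          (PySem.Set.union
            (PySem.Set.ofList (L.foldl pvBCount (PySem.Dict.empty, PySem.Dict.empty)).1.keys)
            (L.foldl pvBCount (PySem.Dict.empty, PySem.Dict.empty)).2.keys) (fun m => m)).foldl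
        (pvBStep (L.foldl pvBCount (PySem.Dict.empty, PySem.Dict.empty)).1
          (L.foldl pvBCount (PySem.Dict.empty, PySem.Dict.empty)).2) (none, -100, 0))).1 :=
    congrArg Prod.fst hA
  have h2 := congrArg (fun (x : Option Int × Int × Int) => x.2.1) hA
  simp only [pvPi] at h1 h2
  rw [h1, h2]
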